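-- pv_equiv track=rewrite | github.com/Saifa36622/fibo-python | another_loop.py | f
-- ===== SOURCE A (Python) =====
-- def f(x):
--     z = []
--     z.append(1)
--     loop = 2
--     total = ""
--     plus = 3
--     mid_total = 1
--     for y in range (1,x):
--         for i in range (y):
--             z.append(loop)
--             loop -= 2
--         loop += 2
--         mid_total = mid_total + plus
--         plus += 2
--         z.append(mid_total)
--         for o in range (y):
--             z.append(loop)
--             loop += 2
--
--     total += "".join(map(str,z))
--     return total
-- ===== SOURCE B (Python) =====
-- def f(x):
--     # Single pass, no inner loops: grow the descending and ascending runs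
--     # incrementally as strings and reuse them for each block.
--     out = ["1"]
--     down = ""
--     up = ""
--     for y in range(1, x):
--         s = str(2 * y)
--         down = s + down
--         up = up + s
--         out.append(down + str((y + 1) * (y + 1)) + up)
--     return "".join(out)
-- ===== Notes on version B (the rewrite author's own statement) =====
-- stated objective: simpler
-- what changed: Replaced A's nested per-element loops with mutable counters (loop/plus/mid_total, an int list joined at the end) by a single loop that grows the descending and ascending runs incrementally as reused strings (down = str(2y)+down, up = up+str(2y)) and emits each block whole as down+str((y+1)^2)+up.
import Mathlib
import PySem

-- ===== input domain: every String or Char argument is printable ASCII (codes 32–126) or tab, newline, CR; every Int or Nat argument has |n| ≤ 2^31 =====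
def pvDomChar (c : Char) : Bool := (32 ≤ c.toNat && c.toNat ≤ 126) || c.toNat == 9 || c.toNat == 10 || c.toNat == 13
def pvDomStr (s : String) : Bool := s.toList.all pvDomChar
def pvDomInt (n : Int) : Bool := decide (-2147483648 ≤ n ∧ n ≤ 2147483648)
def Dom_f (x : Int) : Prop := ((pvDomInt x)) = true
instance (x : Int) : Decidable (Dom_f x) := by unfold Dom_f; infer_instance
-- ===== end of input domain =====

-- B replaces A's nested per-element loops with mutable counters by a single loop that grows
-- the descending and ascending runs incrementally as strings and emits each block whole (objective: simpler).

-- ===== PORT A =====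
-- z.append(loop); loop -= 2
def fStepDown (p : List Int × Int) : List Int × Int := (p.1 ++ [p.2], p.2 - 2)
-- z.append(loop); loop += 2
def fStepUp (p : List Int × Int) : List Int × Int := (p.1 ++ [p.2], p.2 + 2)

-- one iteration of A's outer loop; state = (z, loop, plus, mid_total)
def fOuter (st : List Int × Int × Int × Int) (y : Int) : List Int × Int × Int × Int :=
  let p1 := (PySem.List.pyRange 0 y 1).foldl (fun p _ => fStepDown p) (st.1, st.2.1)
  let loop1 := p1.2 + 2
  let mid1 := st.2.2.2 + st.2.2.1
  let plus1 := st.2.2.1 + 2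
  let z1 := p1.1 ++ [mid1]
  let p2 := (PySem.List.pyRange 0 y 1).foldl (fun p _ => fStepUp p) (z1, loop1)
  (p2.1, p2.2, plus1, mid1)

def f (x : Int) : String :=
  let st := (PySem.List.pyRange 1 x 1).foldl fOuter ([1], 2, 3, 1)
  "" ++ PySem.Str.join "" (st.1.map PySem.Int.toStr)

-- ===== PORT B =====
-- one iteration of B's single loop; state = (out, down, up)
def fAltStep (st : List String × String × String) (y : Int) : List String × String × String :=
  let s := PySem.Int.toStr (2 * y)
  let down := s ++ st.2.1
  let up := st.2.2 ++ s
  (st.1 ++ [down ++ PySem.Int.toStr ((y + 1) * (y + 1)) ++ up], down, up)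

def f_alt (x : Int) : String :=
  PySem.Str.join "" ((PySem.List.pyRange 1 x 1).foldl fAltStep (["1"], "", "")).1

-- ===== PRECONDITION & SPEC =====
def Spec_f (x : Int) (out : String) : Prop := out = f_alt x
instance (x : Int) (out : String) : Decidable (Spec_f x out) := by unfold Spec_f; infer_instance

-- ===== CLAIM =====
def Claim_equal_f : Prop := ∀ (x : Int), Dom_f x → Spec_f x (f x)

-- ===== LEMMAS AND PROOFS =====

-- joining with the empty separator is flattening
theorem pv_join_nil (l : List (List Char)) : PySem.Chars.join [] l = l.flatten := by
  induction l with
  | nil => rfl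
  | cons x t ih =>
    cases t with
    | nil => simp [PySem.Chars.join, List.intercalate]
    | cons y u =>
      simp only [PySem.Chars.join, List.intercalate, List.intersperse] at *
      simp_all

-- a fold that ignores the elements is an iterate of the step, n = length
theorem pv_foldl_ignore {α β : Type} (g : α → α) (l : List β) (a : α) :
    l.foldl (fun a _ => g a) a = g^[l.length] a := by
  induction l generalizing a with
  | nil => rfl
  | cons b t ih => simp [List.foldl_cons, ih, Function.iterate_succ_apply]

theorem pv_iter_down (n : ℕ) : ∀ (z : List Int) (loop : Int),
    fStepDown^[n] (z, loop) =
      (z ++ (List.range n).map (fun k : ℕ => loop - 2 * (k : Int)), loop - 2 * n) := by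
  induction n with
  | zero => intro z loop; simp
  | succ m ih =>
    intro z loop
    rw [Function.iterate_succ_apply]
    show fStepDown^[m] (z ++ [loop], loop - 2) = _
    rw [ih]
    have hh : (List.range (m+1)).map (fun k : ℕ => loop - 2 * (k : Int))
        = loop :: (List.range m).map (fun k : ℕ => loop - 2 - 2 * (k : Int)) := by
      rw [List.range_succ_eq_map, List.map_cons, List.map_map]
      refine congrArg₂ _ (by norm_num) ?_
      apply List.map_congr_left; intro k _; simp only [Function.comp]; push_cast; ring
    rw [Prod.mk.injEq]
    refine ⟨?_, by push_cast; ring⟩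
    rw [hh]
    simp [List.append_assoc]

theorem pv_iter_up (n : ℕ) : ∀ (z : List Int) (loop : Int),
    fStepUp^[n] (z, loop) =
      (z ++ (List.range n).map (fun k : ℕ => loop + 2 * (k : Int)), loop + 2 * n) := by
  induction n with
  | zero => intro z loop; simp
  | succ m ih =>
    intro z loop
    rw [Function.iterate_succ_apply]
    show fStepUp^[m] (z ++ [loop], loop + 2) = _
    rw [ih]
    have hh : (List.range (m+1)).map (fun k : ℕ => loop + 2 * (k : Int))
        = loop :: (List.range m).map (fun k : ℕ => loop + 2 + 2 * (k : Int)) := by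
      rw [List.range_succ_eq_map, List.map_cons, List.map_map]
      refine congrArg₂ _ (by norm_num) ?_
      apply List.map_congr_left; intro k _; simp only [Function.comp]; push_cast; ring
    rw [Prod.mk.injEq]
    refine ⟨?_, by push_cast; ring⟩
    rw [hh]
    simp [List.append_assoc]

-- one step of A's outer loop, evaluated by the inner-loop lemmas
theorem pv_fOuter_eq (st : List Int × Int × Int × Int) (y : Int) :
    fOuter st y =
      (st.1 ++ (List.range y.toNat).map (fun k : ℕ => st.2.1 - 2 * (k : Int))
            ++ ([st.2.2.2 + st.2.2.1]
            ++ (List.range y.toNat).map (fun k : ℕ => st.2.1 - 2 * (y.toNat : Int) + 2 + 2 * (k : Int))),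
       (st.2.1 - 2 * (y.toNat : Int) + 2 + 2 * (y.toNat : Int),
        (st.2.2.1 + 2, st.2.2.2 + st.2.2.1))) := by
  simp only [fOuter]
  rw [pv_foldl_ignore, pv_foldl_ignore, PySem.List.length_pyRange_one]
  rw [pv_iter_down, pv_iter_up]
  simp [List.append_assoc]

-- closed forms of A's accumulators after the outer loop over range(1, 1+n)
theorem pv_mainA (n : ℕ) :
    ((PySem.List.pyRange 1 (1 + (n : Int)) 1).foldl fOuter ([1], 2, 3, 1)).2.1 = 2 * ((n : Int) + 1)
    ∧ ((PySem.List.pyRange 1 (1 + (n : Int)) 1).foldl fOuter ([1], 2, 3, 1)).2.2.1 = 2 * ((n : Int) + 1) + 1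
    ∧ ((PySem.List.pyRange 1 (1 + (n : Int)) 1).foldl fOuter ([1], 2, 3, 1)).2.2.2 = ((n : Int) + 1) * ((n : Int) + 1) := by
  induction n with
  | zero =>
    rw [show ((1 : Int) + (0 : ℕ)) = 1 by norm_num, PySem.List.pyRange_one_eq_nil le_rfl]
    refine ⟨by norm_num, by norm_num, by norm_num⟩
  | succ m ih =>
    obtain ⟨hloop, hplus, hmid⟩ := ih
    have hrange : PySem.List.pyRange 1 (1 + ((m : Int) + 1)) 1
        = PySem.List.pyRange 1 (1 + (m : Int)) 1 ++ [1 + (m : Int)] := by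
      rw [show (1 : Int) + ((m : Int) + 1) = (1 + (m : Int)) + 1 by ring]
      exact PySem.List.pyRange_one_succ_right (by omega)
    push_cast
    rw [hrange, List.foldl_append]
    simp only [List.foldl_cons, List.foldl_nil]
    set stA := (PySem.List.pyRange 1 (1 + (m : Int)) 1).foldl fOuter ([1], 2, 3, 1) with hstA
    have ht : ((1 : Int) + (m : Int)).toNat = m + 1 := by omega
    have hstep := pv_fOuter_eq stA (1 + (m : Int))
    rw [ht, hloop, hplus, hmid] at hstep
    rw [hstep]
    refine ⟨by push_cast; ring, by push_cast; ring, by push_cast; ring⟩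

-- main invariant: the flattened character output of B's state equals that of A's list,
-- and B's down/up strings are the flattened runs for y = n
theorem pv_mainB (n : ℕ) :
    ((((PySem.List.pyRange 1 (1 + (n : Int)) 1).foldl fAltStep (["1"], "", "")).1.map String.toList).flatten
      = (((PySem.List.pyRange 1 (1 + (n : Int)) 1).foldl fOuter ([1], 2, 3, 1)).1.map
          (fun z => (PySem.Int.toStr z).toList)).flatten)
    ∧ (((PySem.List.pyRange 1 (1 + (n : Int)) 1).foldl fAltStep (["1"], "", "")).2.1.toList
      = ((List.range n).map (fun k : ℕ => (PySem.Int.toStr (2 * (n : Int) - 2 * (k : Int))).toList)).flatten)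
    ∧ (((PySem.List.pyRange 1 (1 + (n : Int)) 1).foldl fAltStep (["1"], "", "")).2.2.toList
      = ((List.range n).map (fun k : ℕ => (PySem.Int.toStr (2 + 2 * (k : Int))).toList)).flatten) := by
  induction n with
  | zero =>
    rw [show ((1 : Int) + (0 : ℕ)) = 1 by norm_num, PySem.List.pyRange_one_eq_nil le_rfl]
    refine ⟨by decide, by decide, by decide⟩
  | succ m ih =>
    obtain ⟨hz, hdown, hup⟩ := ih
    obtain ⟨hloop, hplus, hmid⟩ := pv_mainA m
    have hrange : PySem.List.pyRange 1 (1 + ((m : Int) + 1)) 1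
        = PySem.List.pyRange 1 (1 + (m : Int)) 1 ++ [1 + (m : Int)] := by
      rw [show (1 : Int) + ((m : Int) + 1) = (1 + (m : Int)) + 1 by ring]
      exact PySem.List.pyRange_one_succ_right (by omega)
    push_cast
    rw [hrange, List.foldl_append, List.foldl_append]
    simp only [List.foldl_cons, List.foldl_nil]
    set stA := (PySem.List.pyRange 1 (1 + (m : Int)) 1).foldl fOuter ([1], 2, 3, 1) with hstA
    set stB := (PySem.List.pyRange 1 (1 + (m : Int)) 1).foldl fAltStep (["1"], "", "") with hstB
    have ht : ((1 : Int) + (m : Int)).toNat = m + 1 := by omega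
    have hstep := pv_fOuter_eq stA (1 + (m : Int))
    rw [ht, hloop, hplus, hmid] at hstep
    rw [hstep]
    simp only [fAltStep]
    -- the new down string is the y = m+1 descending run
    have hdown' : (PySem.Int.toStr (2 * (1 + (m : Int))) ++ stB.2.1).toList
        = ((List.range (m + 1)).map (fun k : ℕ =>
            (PySem.Int.toStr (2 * ((m : Int) + 1) - 2 * (k : Int))).toList)).flatten := by
      rw [List.range_succ_eq_map, List.map_cons, List.map_map, List.flatten_cons,
        String.toList_append, hdown]
      refine congrArg₂ _ (congrArg _ (congrArg _ (by push_cast; ring))) ?_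
      refine congrArg List.flatten ?_
      apply List.map_congr_left
      intro k _
      simp only [Function.comp]
      exact congrArg String.toList (congrArg PySem.Int.toStr (by push_cast; ring))
    -- the new up string is the y = m+1 ascending run
    have hup' : (stB.2.2 ++ PySem.Int.toStr (2 * (1 + (m : Int)))).toList
        = ((List.range (m + 1)).map (fun k : ℕ =>
            (PySem.Int.toStr (2 + 2 * (k : Int))).toList)).flatten := by
      rw [List.range_succ, List.map_append, List.flatten_append, String.toList_append, hup]
      refine congrArg₂ _ rfl ?_
      simp only [List.map_cons, List.map_nil, List.flatten_cons, List.flatten_nil, List.append_nil]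
      exact congrArg String.toList (congrArg PySem.Int.toStr (by ring))
    refine ⟨?_, ?_, ?_⟩
    · -- flattened outputs stay equal
      simp only [List.map_append, List.flatten_append, List.map_cons, List.map_nil,
        List.flatten_cons, List.flatten_nil, List.append_nil, List.map_map,
        List.append_assoc, hz]
      refine congrArg₂ _ rfl ?_
      rw [String.toList_append, String.toList_append, hdown', hup']
      simp only [List.append_assoc]
      refine congrArg₂ _ ?_ (congrArg₂ _ ?_ ?_)
      · refine congrArg List.flatten ?_
        apply List.map_congr_left
        intro k _
        simp only [Function.comp]
      · exact congrArg String.toList (congrArg PySem.Int.toStr (by ring))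
      · refine congrArg List.flatten ?_
        apply List.map_congr_left
        intro k _
        simp only [Function.comp]
        exact congrArg String.toList (congrArg PySem.Int.toStr (by push_cast; ring))
    · exact hdown'
    · exact hup'

-- ===== VERDICT =====
theorem f_spec : Claim_equal_f := by
  intro x _
  unfold Spec_f f f_alt
  by_cases hx : x ≤ 1
  · rw [PySem.List.pyRange_one_eq_nil hx]
    decide
  · have hx' : x = 1 + ((x - 1).toNat : Int) := by omega
    rw [hx']
    have h := (pv_mainB (x - 1).toNat).1
    have he : ("" : String) ++ PySem.Str.join ""
        (((PySem.List.pyRange 1 (1 + ((x - 1).toNat : Int)) 1).foldl fOuter ([1], 2, 3, 1)).1.map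
          PySem.Int.toStr)
        = PySem.Str.join ""
        (((PySem.List.pyRange 1 (1 + ((x - 1).toNat : Int)) 1).foldl fOuter ([1], 2, 3, 1)).1.map
          PySem.Int.toStr) := by
      simp
    rw [he, PySem.Str.join, PySem.Str.join]
    refine congrArg String.ofList ?_
    rw [show ("" : String).toList = [] from rfl, pv_join_nil, pv_join_nil, List.map_map]
    have h2 : (List.map (String.toList ∘ PySem.Int.toStr)
        ((PySem.List.pyRange 1 (1 + ((x - 1).toNat : Int)) 1).foldl fOuter ([1], 2, 3, 1)).1)
        = List.map (fun z => (PySem.Int.toStr z).toList)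
        ((PySem.List.pyRange 1 (1 + ((x - 1).toNat : Int)) 1).foldl fOuter ([1], 2, 3, 1)).1 := rfl
    rw [h2]
    exact h.symm
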